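-- pv_equiv track=rewrite | github.com/ASSERT-KTH/Mokav | experiments/pynguin/c4b/return-lst/generated_tests/src_267/6/src_267.py | func
-- ===== SOURCE A (Python) =====
-- def func(*args):
-- 	ret_values = []
--
-- 	n = int(args[0])
-- 	names = ['Sheldon', 'Leonard', 'Penny', 'Rajesh', 'Howard']
-- 	cnt = 1
-- 	while (n > (cnt * 5)):
-- 	    n -= (cnt * 5)
-- 	    cnt *= 2
-- 	ret_values.append(names[((n - 1) // cnt)])
--
-- 	return ret_values
-- ===== SOURCE B (Python) =====
-- def func(*args):
--     n = int(args[0])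
--     names = ['Sheldon', 'Leonard', 'Penny', 'Rajesh', 'Howard']
--     if n <= 5:
--         t = 0
--     else:
--         t = ((n + 4) // 5).bit_length() - 1
--     cnt = 1 << t
--     r = n - 5 * (cnt - 1)
--     return [names[(r - 1) // cnt]]
-- ===== Notes on version B (the rewrite author's own statement) =====
-- stated objective: alternative
-- what changed: Replaces the subtract-and-double while loop by a closed-form computation of the block index via integer bit_length, then one division.
import Mathlib
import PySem

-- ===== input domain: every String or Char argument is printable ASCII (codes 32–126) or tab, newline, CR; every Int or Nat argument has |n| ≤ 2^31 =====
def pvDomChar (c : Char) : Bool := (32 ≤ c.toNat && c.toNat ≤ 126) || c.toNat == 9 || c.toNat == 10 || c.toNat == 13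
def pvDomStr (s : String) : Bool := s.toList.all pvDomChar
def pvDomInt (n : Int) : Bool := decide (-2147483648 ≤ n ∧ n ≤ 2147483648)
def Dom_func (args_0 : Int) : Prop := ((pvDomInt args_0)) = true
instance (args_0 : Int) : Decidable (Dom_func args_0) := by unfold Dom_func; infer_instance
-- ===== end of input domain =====

-- B replaces A's subtract-and-double loop by a closed-form bit_length computation of the block; return value only.


-- ===== PORT A =====
-- the while loop of A: while n > cnt*5: n -= cnt*5; cnt *= 2   (cnt stays positive, so it terminates)
def funcLoop (n cnt : Int) (h : 0 < cnt) : Int × Int :=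
  if n > cnt * 5 then funcLoop (n - cnt * 5) (cnt * 2) (by omega) else (n, cnt)
termination_by n.toNat
decreasing_by omega

def func (args_0 : Int) : List String :=
  let names : List String := ["Sheldon", "Leonard", "Penny", "Rajesh", "Howard"]
  let p := funcLoop args_0 1 (by omega)
  -- names[(n - 1) // cnt]: none = IndexError, excluded by Pre_func
  match PySem.List.pyGet? names (PySem.Int.floordiv (p.1 - 1) p.2) with
  | some s => [s]
  | none => []

-- ===== PORT B =====
def func_alt (args_0 : Int) : List String :=
  let n := args_0
  let names : List String := ["Sheldon", "Leonard", "Penny", "Rajesh", "Howard"]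
  -- ((n + 4) // 5).bit_length() - 1
  let t : Nat := if n ≤ 5 then 0 else PySem.Int.bitLength (PySem.Int.floordiv (n + 4) 5) - 1
  let cnt : Int := 2 ^ t          -- 1 << t
  let r : Int := n - 5 * (cnt - 1)
  -- names[(r - 1) // cnt]: none = IndexError, excluded by Pre_func
  match PySem.List.pyGet? names (PySem.Int.floordiv (r - 1) cnt) with
  | some s => [s]
  | none => []

-- ===== PRECONDITION & SPEC =====
-- Pre_ excludes n ≤ -5, where A's names[n-1] raises IndexError (negative index below -5).
def Pre_func (args_0 : Int) : Prop := -4 ≤ args_0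
instance (args_0 : Int) : Decidable (Pre_func args_0) := by unfold Pre_func; infer_instance
def pvWitness_func : Int := (6)

def Spec_func (args_0 : Int) (out : List String) : Prop := out = func_alt args_0
instance (args_0 : Int) (out : List String) : Decidable (Spec_func args_0 out) := by unfold Spec_func; infer_instance

-- ===== CLAIM (what is proved, stated in full; the proofs are below) =====
def Claim_equal_func : Prop := ∀ (args_0 : Int), Dom_func args_0 → Pre_func args_0 → Spec_func args_0 (func args_0)

-- ===== LEMMAS AND PROOFS =====

-- characterization of the loop result
theorem funcLoop_spec (n cnt : Int) (h : 0 < cnt) :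
    ∃ j : Nat, (funcLoop n cnt h).2 = cnt * 2 ^ j ∧
      (funcLoop n cnt h).1 = n - 5 * cnt * (2 ^ j - 1) ∧
      (funcLoop n cnt h).1 ≤ 5 * (funcLoop n cnt h).2 ∧
      (j = 0 ∨ n - 5 * cnt * (2 ^ (j - 1) - 1) > 5 * (cnt * 2 ^ (j - 1))) := by
  induction n, cnt, h using funcLoop.induct with
  | case1 n cnt h hn ih =>
    obtain ⟨j, h2, h1, hle, hprev⟩ := ih
    refine ⟨j + 1, ?_, ?_, ?_, ?_⟩
    · rw [funcLoop, if_pos hn, h2]; ring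
    · rw [funcLoop, if_pos hn, h1, pow_succ]; ring
    · rw [funcLoop, if_pos hn]; exact hle
    · right
      simp only [Nat.add_sub_cancel]
      rcases hprev with h0 | hgt
      · subst h0
        simp only [pow_zero]
        linarith
      · have hj : 1 ≤ j := by
          rcases Nat.eq_zero_or_pos j with h0 | h1
          · subst h0; simp at hgt; linarith
          · exact h1
        have hpow : (2:Int) ^ j = 2 * 2 ^ (j - 1) := by
          rw [← pow_succ']; congr 1; omega
        rw [hpow]
        nlinarith [hgt]
  | case2 n cnt h hn =>
    refine ⟨0, ?_, ?_, ?_, Or.inl rfl⟩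
    · rw [funcLoop, if_neg hn]; ring
    · rw [funcLoop, if_neg hn]; ring
    · rw [funcLoop, if_neg hn]
      simp only
      linarith

-- the exponent the loop reaches, starting from cnt = 1, is unique
theorem j_unique (n : Int) (j₁ j₂ : Nat)
    (hA₁ : n ≤ 5 * (2 ^ (j₁ + 1) - 1)) (hB₁ : j₁ = 0 ∨ n > 5 * ((2:Int) ^ j₁ - 1))
    (hA₂ : n ≤ 5 * (2 ^ (j₂ + 1) - 1)) (hB₂ : j₂ = 0 ∨ n > 5 * ((2:Int) ^ j₂ - 1)) :
    j₁ = j₂ := by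
  by_contra hne
  have key : ∀ a b : Nat, a < b → n ≤ 5 * (2 ^ (a + 1) - 1) →
      (b = 0 ∨ n > 5 * ((2:Int) ^ b - 1)) → False := by
    intro a b hab ha hb
    rcases hb with h0 | hgt
    · omega
    · have hmono : (2:Int) ^ (a + 1) ≤ 2 ^ b := by
        apply pow_le_pow_right₀ (by norm_num) (by omega)
      linarith
  rcases Nat.lt_or_ge j₁ j₂ with hlt | hge
  · exact key j₁ j₂ hlt hA₁ hB₂
  · exact key j₂ j₁ (by omega) hA₂ hB₁

-- main equivalence
theorem func_eq (n : Int) (_hpre : -4 ≤ n) : func n = func_alt n := by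
  obtain ⟨j, h2, h1, hle, hprev⟩ := funcLoop_spec n 1 (by norm_num)
  simp only [one_mul, mul_one] at h2 h1 hprev
  rw [h2, h1] at hle
  have hj : j = (if n ≤ 5 then 0 else PySem.Int.bitLength (PySem.Int.floordiv (n + 4) 5) - 1) := by
    by_cases hn5 : n ≤ 5
    · rw [if_pos hn5]
      rcases hprev with h0 | hgt
      · exact h0
      · exfalso
        have hj1 : 1 ≤ j := by
          rcases Nat.eq_zero_or_pos j with h0 | h1
          · subst h0; simp at hgt; linarith
          · exact h1
        have hge1 : (1:Int) ≤ 2 ^ (j - 1) := one_le_pow₀ (by norm_num)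
        linarith
    · rw [if_neg hn5]
      push_neg at hn5
      set m : Int := PySem.Int.floordiv (n + 4) 5 with hm
      have hfd : m = (n + 4) / 5 := PySem.Int.floordiv_eq_ediv_of_pos (by norm_num)
      have hmge : 2 ≤ m := by omega
      have hmle : 5 * m ≤ n + 4 := by omega
      have hnle : n ≤ 5 * m := by omega
      set t : Nat := PySem.Int.bitLength m - 1 with ht
      have hbl := PySem.Int.lt_two_pow_bitLength m
      have hbl2 := PySem.Int.two_pow_bitLength_le m (by omega)
      have hblpos : 1 ≤ PySem.Int.bitLength m := by
        rcases Nat.eq_zero_or_pos (PySem.Int.bitLength m) with h0 | h1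
        · rw [h0] at hbl; simp at hbl; omega
        · exact h1
      have habs : (m.natAbs : Int) = m := by omega
      have hlow : (2:Int) ^ t ≤ m := by
        calc (2:Int) ^ t = ((2 ^ t : Nat) : Int) := by push_cast; ring
        _ ≤ (m.natAbs : Int) := by exact_mod_cast Nat.cast_le.mpr (ht ▸ hbl2)
        _ = m := habs
      have hhigh : m < (2:Int) ^ (t + 1) := by
        have hbt : PySem.Int.bitLength m = t + 1 := by omega
        calc m = (m.natAbs : Int) := habs.symm
        _ < ((2 ^ (t + 1) : Nat) : Int) := by exact_mod_cast Nat.cast_lt.mpr (hbt ▸ hbl)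
        _ = (2:Int) ^ (t + 1) := by push_cast; ring
      -- interval conditions for j
      have hjA : n ≤ 5 * ((2:Int) ^ (j + 1) - 1) := by
        rw [pow_succ]; linarith
      have hjB : j = 0 ∨ n > 5 * ((2:Int) ^ j - 1) := by
        rcases hprev with h0 | hgt
        · exact Or.inl h0
        · right
          have hj1 : 1 ≤ j := by
            rcases Nat.eq_zero_or_pos j with h0 | h1
            · subst h0; simp at hgt; linarith
            · exact h1
          have hpow : (2:Int) ^ j = 2 * 2 ^ (j - 1) := by
            rw [← pow_succ']; congr 1; omega
          rw [hpow]
          nlinarith [hgt]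
      -- interval conditions for t
      have htA : n ≤ 5 * ((2:Int) ^ (t + 1) - 1) := by linarith
      have htB : (t = 0 ∨ n > 5 * ((2:Int) ^ t - 1)) := Or.inr (by linarith)
      exact j_unique n j t hjA hjB htA htB
  simp only [func, func_alt]
  rw [h2, h1, hj]

-- ===== VERDICT (by name: the statement is the Claim_ definition above) =====
theorem func_spec : Claim_equal_func := by
  intro a _ hpre
  unfold Spec_func
  exact func_eq a hpre
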